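-- pv_equiv track=rewrite | github.com/farhannadim311/mice-sleeper | lab.py | gen_coordinates
-- ===== SOURCE A (Python) =====
-- def gen_coordinates(cross):
--     """
--     Generates all possible coordinates of arbitrary depth
--     """
--     res = []
--     if (len(cross) ==  1):
--         for i in range(cross[0]):
--             res.append((i,))
--         return res
--     else:
--         first = cross[0]
--         rest = gen_coordinates(cross[1:])
--         first_seq = []
--         for seq in rest:
--             for i in range(first):
--                 first_seq.append((i, *seq))
--         return first_seq
-- ===== SOURCE B (Python) =====
-- def gen_coordinates(cross):
--     """
--     Generates all possible coordinates of arbitrary depth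
--     """
--     res = [(i,) for i in range(cross[-1])]
--     for dim in reversed(cross[:-1]):
--         res = [(i, *seq) for seq in res for i in range(dim)]
--     return res
-- ===== Notes on version B (the rewrite author's own statement) =====
-- stated objective: alternative
-- what changed: Replaces the recursion over the dimension list with an iterative fold: seed tuples from the last dimension, then extend them front-to-back by looping over the remaining dimensions in reverse, using comprehensions instead of recursive calls and append loops.
import Mathlib
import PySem

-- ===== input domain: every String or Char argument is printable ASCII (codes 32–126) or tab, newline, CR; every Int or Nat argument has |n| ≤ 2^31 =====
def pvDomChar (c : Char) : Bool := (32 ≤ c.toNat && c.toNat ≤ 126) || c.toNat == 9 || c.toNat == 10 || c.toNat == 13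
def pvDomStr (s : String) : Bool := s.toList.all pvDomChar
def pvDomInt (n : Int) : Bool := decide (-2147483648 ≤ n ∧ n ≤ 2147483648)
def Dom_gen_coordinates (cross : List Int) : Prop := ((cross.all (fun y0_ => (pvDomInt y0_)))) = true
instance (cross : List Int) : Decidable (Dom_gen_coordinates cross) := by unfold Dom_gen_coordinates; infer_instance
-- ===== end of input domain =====

-- B replaces A's recursion with an iterative fold over the dimensions in reverse; same values, same order (objective: alternative).

-- ===== PORT A =====
def gen_coordinates (cross : List Int) : List (List Int) :=
  match cross with
  | [] => []  -- Python raises IndexError here; excluded by Pre_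
  | [c] =>
      (PySem.List.pyRange 0 c 1).foldl (fun res i => res ++ [[i]]) []
  | first :: rest =>
      let r := gen_coordinates rest
      r.foldl (fun acc seq =>
        (PySem.List.pyRange 0 first 1).foldl (fun a i => a ++ [i :: seq]) acc) []

-- ===== PORT B =====
def gen_coordinates_alt (cross : List Int) : List (List Int) :=
  match cross.getLast? with
  | none => []  -- Python raises IndexError here; excluded by Pre_
  | some last =>
      let init : List (List Int) := (PySem.List.pyRange 0 last 1).map (fun i => [i])
      (cross.dropLast.reverse).foldl
        (fun res dim => res.flatMap (fun seq => (PySem.List.pyRange 0 dim 1).map (fun i => i :: seq)))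
        init

-- ===== PRECONDITION & SPEC =====
-- Pre_ excludes only the empty list, on which the Python A raises IndexError.
def Pre_gen_coordinates (cross : List Int) : Prop := cross ≠ []
instance (cross : List Int) : Decidable (Pre_gen_coordinates cross) := by unfold Pre_gen_coordinates; infer_instance
def pvWitness_gen_coordinates : List Int := [2, 3]
def Spec_gen_coordinates (cross : List Int) (out : List (List Int)) : Prop := out = gen_coordinates_alt cross
instance (cross : List Int) (out : List (List Int)) : Decidable (Spec_gen_coordinates cross out) := by unfold Spec_gen_coordinates; infer_instance

-- ===== CLAIM (what is proved, stated in full; the proofs are below) =====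
def Claim_equal_gen_coordinates : Prop := ∀ (cross : List Int), Dom_gen_coordinates cross → Pre_gen_coordinates cross → Spec_gen_coordinates cross (gen_coordinates cross)

-- ===== LEMMAS AND PROOFS =====

-- A's nested append loop is a flatMap of maps over the recursive result.
theorem genA_cons (first r : Int) (rs : List Int) :
    gen_coordinates (first :: r :: rs)
      = (gen_coordinates (r :: rs)).flatMap
          (fun seq => (PySem.List.pyRange 0 first 1).map (fun i => i :: seq)) := by
  show (gen_coordinates (r :: rs)).foldl _ [] = _
  have h := PySem.List.foldl_congr_mem
    (l := gen_coordinates (r :: rs)) (init := ([] : List (List Int)))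
    (f := fun acc seq => (PySem.List.pyRange 0 first 1).foldl (fun a i => a ++ [i :: seq]) acc)
    (g := fun acc seq => acc ++ (PySem.List.pyRange 0 first 1).map (fun i => i :: seq))
    (fun acc seq _ => PySem.List.foldl_append_singleton_eq_map _ _ acc)
  rw [h, PySem.List.foldl_append_eq_flatMap]
  simp

theorem genA_single (c : Int) :
    gen_coordinates [c] = (PySem.List.pyRange 0 c 1).map (fun i => [i]) := by
  show (PySem.List.pyRange 0 c 1).foldl _ [] = _
  rw [PySem.List.foldl_append_singleton_eq_map]
  simp

theorem genB_cons (first r : Int) (rs : List Int) :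
    gen_coordinates_alt (first :: r :: rs)
      = (gen_coordinates_alt (r :: rs)).flatMap
          (fun seq => (PySem.List.pyRange 0 first 1).map (fun i => i :: seq)) := by
  unfold gen_coordinates_alt
  have hL : (first :: r :: rs).getLast? = (r :: rs).getLast? := by
    simp [List.getLast?_cons_cons]
  rw [hL]
  cases h : (r :: rs).getLast? with
  | none => simp at h
  | some last =>
      simp only []
      have hd : (first :: r :: rs).dropLast = first :: (r :: rs).dropLast := rfl
      rw [hd, List.reverse_cons, List.foldl_append]
      rfl

theorem genB_single (c : Int) :
    gen_coordinates_alt [c] = (PySem.List.pyRange 0 c 1).map (fun i => [i]) := rfl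

theorem gen_eq : ∀ (cross : List Int), cross ≠ [] → gen_coordinates cross = gen_coordinates_alt cross := by
  intro cross
  induction cross with
  | nil => intro h; exact absurd rfl h
  | cons first rest ih =>
      intro _
      cases rest with
      | nil => rw [genA_single, genB_single]
      | cons r rs =>
          rw [genA_cons, genB_cons, ih (by simp)]

-- ===== VERDICT (by name: the statement is the Claim_ definition above) =====
theorem gen_coordinates_spec : Claim_equal_gen_coordinates := by
  intro cross _ hpre
  exact gen_eq cross hpre
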